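-- pv_equiv track=rewrite | github.com/popey/ResearchClaw | src/researchclaw/app/gateway/dispatch.py | dedupe_dispatch_mappings
-- ===== SOURCE A (Python) =====
-- from dataclasses import dataclass
-- from typing import Any
--
-- @dataclass(frozen=True)
-- class DispatchTarget:
--     """Normalized outbound dispatch target."""
--
--     channel: str
--     user_id: str = "main"
--     session_id: str = "main"
--
-- def normalize_channel_name(name: str) -> str:
--     """Normalize a channel key for routing and dedupe."""
--     return (name or "").strip().lower()
--
-- def coerce_dispatch_target(
--     *,
--     channel: str,
--     user_id: str = "main",
--     session_id: str = "main",
-- ) -> DispatchTarget | None: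
--     """Build a normalized dispatch target or return None for empty channels."""
--     normalized = normalize_channel_name(channel)
--     if not normalized:
--         return None
--     return DispatchTarget(
--         channel=normalized,
--         user_id=(user_id or "").strip() or "main",
--         session_id=(session_id or "").strip() or "main",
--     )
--
-- def dedupe_dispatch_mappings(
--     dispatches: list[dict[str, Any]],
-- ) -> list[dict[str, str]]:
--     """Normalize and dedupe dispatch mapping dictionaries."""
--     out: list[dict[str, str]] = []
--     seen: set[tuple[str, str, str]] = set()
--     for item in dispatches:
--         target = coerce_dispatch_target(
--             channel=str(item.get("channel", "")),
--             user_id=str(item.get("user_id", "") or ""),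
--             session_id=str(item.get("session_id", "") or ""),
--         )
--         if target is None:
--             continue
--         key = (target.channel, target.user_id, target.session_id)
--         if key in seen:
--             continue
--         seen.add(key)
--         out.append(
--             {
--                 "channel": target.channel,
--                 "user_id": target.user_id,
--                 "session_id": target.session_id,
--             },
--         )
--     return out
-- ===== SOURCE B (Python) =====
-- from dataclasses import dataclass
-- from typing import Any
--
-- @dataclass(frozen=True)
-- class DispatchTarget:
--     """Normalized outbound dispatch target."""
--
--     channel: str
--     user_id: str = "main"
--     session_id: str = "main"
--
-- def normalize_channel_name(name: str) -> str:
--     return (name or "").strip().lower()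
--
-- def coerce_dispatch_target(
--     *,
--     channel: str,
--     user_id: str = "main",
--     session_id: str = "main",
-- ) -> DispatchTarget | None:
--     normalized = normalize_channel_name(channel)
--     if not normalized:
--         return None
--     return DispatchTarget(
--         channel=normalized,
--         user_id=(user_id or "").strip() or "main",
--         session_id=(session_id or "").strip() or "main",
--     )
--
-- def dedupe_dispatch_mappings(
--     dispatches: list[dict[str, Any]],
-- ) -> list[dict[str, str]]:
--     """Normalize and dedupe dispatch mappings by sieving out duplicates of each head."""
--     pending = [
--         t
--         for item in dispatches
--         if (t := coerce_dispatch_target(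
--             channel=str(item.get("channel", "")),
--             user_id=str(item.get("user_id", "") or ""),
--             session_id=str(item.get("session_id", "") or ""),
--         )) is not None
--     ]
--     out: list[dict[str, str]] = []
--     while pending:
--         head = pending[0]
--         out.append(
--             {
--                 "channel": head.channel,
--                 "user_id": head.user_id,
--                 "session_id": head.session_id,
--             },
--         )
--         pending = [t for t in pending[1:] if t != head]
--     return out
-- ===== Notes on version B (the rewrite author's own statement) =====
-- stated objective: alternative
-- what changed: Drops A's seen-set bookkeeping entirely: B first coerces all targets, then dedupes by a sieve loop that emits the first remaining target and filters every later duplicate of it out of the remaining list (first occurrences fall out of the sieve, not of a membership set).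
import Mathlib
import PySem

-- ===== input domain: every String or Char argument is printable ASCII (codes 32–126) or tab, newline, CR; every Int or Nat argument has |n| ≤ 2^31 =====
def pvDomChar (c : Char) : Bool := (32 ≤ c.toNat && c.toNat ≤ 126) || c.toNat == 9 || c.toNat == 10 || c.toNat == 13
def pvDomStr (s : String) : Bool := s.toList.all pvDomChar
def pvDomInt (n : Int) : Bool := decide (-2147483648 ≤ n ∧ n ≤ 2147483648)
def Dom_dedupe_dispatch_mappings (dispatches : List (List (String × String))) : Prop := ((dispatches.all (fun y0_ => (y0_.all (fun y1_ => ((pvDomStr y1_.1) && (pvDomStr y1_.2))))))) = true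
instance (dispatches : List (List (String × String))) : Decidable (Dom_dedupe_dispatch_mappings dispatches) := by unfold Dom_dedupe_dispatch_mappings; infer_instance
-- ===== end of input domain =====

-- B drops A's seen-set: it coerces all targets first, then dedupes with a sieve loop
-- that emits the head and filters its duplicates out of the remaining list
-- (objective: alternative algorithm, no membership set maintained).

-- ===== PORT A =====
-- normalize_channel_name
def normalize_channel_name (name : String) : String :=
  PySem.Str.lower (PySem.Str.strip name)

-- coerce_dispatch_target; DispatchTarget ported as a triple (channel, user_id, session_id)
def coerce_dispatch_target (channel user_id session_id : String) :
    Option (String × String × String) :=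
  let normalized := normalize_channel_name channel
  if normalized = "" then none
  else
    let u := PySem.Str.strip user_id
    let s := PySem.Str.strip session_id
    some (normalized, (if u = "" then "main" else u), (if s = "" then "main" else s))

-- the output dict literal {"channel": …, "user_id": …, "session_id": …}
def pvMkOut (k : String × String × String) : List (String × String) :=
  [("channel", k.1), ("user_id", k.2.1), ("session_id", k.2.2)]

-- item.get(…) coercion applied to one input dict (str() on a str is the identity;
-- 'x or ""' on a str x is the identity)
def pvCoerceItem (item : List (String × String)) : Option (String × String × String) :=
  coerce_dispatch_target
    ((PySem.Dict.mk item).getD "channel" "")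
    ((PySem.Dict.mk item).getD "user_id" "")
    ((PySem.Dict.mk item).getD "session_id" "")

-- A's loop step over (out, seen)
def pvStepA (st : List (List (String × String)) × PySem.Set (String × String × String))
    (item : List (String × String)) :
    List (List (String × String)) × PySem.Set (String × String × String) :=
  match pvCoerceItem item with
  | none => st
  | some t =>
    if PySem.Set.contains st.2 t then st
    else (st.1 ++ [pvMkOut t], PySem.Set.add st.2 t)

def dedupe_dispatch_mappings (dispatches : List (List (String × String))) :
    List (List (String × String)) :=
  (dispatches.foldl pvStepA ([], PySem.Set.empty)).1

-- ===== PORT B =====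
-- B's while loop: emit the head's output dict, filter the head's duplicates from the rest
def pvSieve : List (String × String × String) → List (List (String × String))
  | [] => []
  | k :: ks => pvMkOut k :: pvSieve (ks.filter (fun t => t ≠ k))
termination_by l => l.length
decreasing_by
  simp
  exact le_trans (List.length_filter_le _ _) (by simp)

def dedupe_dispatch_mappings_alt (dispatches : List (List (String × String))) :
    List (List (String × String)) :=
  pvSieve (dispatches.filterMap pvCoerceItem)

-- ===== PRECONDITION & SPEC =====
def Spec_dedupe_dispatch_mappings (dispatches : List (List (String × String))) (out : List (List (String × String))) : Prop := out = dedupe_dispatch_mappings_alt dispatches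
instance (dispatches : List (List (String × String))) (out : List (List (String × String))) : Decidable (Spec_dedupe_dispatch_mappings dispatches out) := by unfold Spec_dedupe_dispatch_mappings; infer_instance

-- ===== CLAIM (what is proved, stated in full; the proofs are below) =====
def Claim_equal_dedupe_dispatch_mappings : Prop := ∀ (dispatches : List (List (String × String))), Dom_dedupe_dispatch_mappings dispatches → Spec_dedupe_dispatch_mappings dispatches (dedupe_dispatch_mappings dispatches)

-- ===== LEMMAS AND PROOFS =====

lemma pvSieve_nil : pvSieve [] = [] := by rw [pvSieve.eq_def]

lemma pvSieve_cons (k : String × String × String) (ks : List (String × String × String)) :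
    pvSieve (k :: ks) = pvMkOut k :: pvSieve (ks.filter (fun t => t ≠ k)) := by
  rw [pvSieve.eq_def]

-- A's fold over dispatches equals the same fold over the filterMap'ed targets.
lemma pv_foldA_filterMap (l : List (List (String × String)))
    (st : List (List (String × String)) × PySem.Set (String × String × String)) :
    l.foldl pvStepA st
      = (l.filterMap pvCoerceItem).foldl
          (fun st t =>
            if PySem.Set.contains st.2 t then st
            else (st.1 ++ [pvMkOut t], PySem.Set.add st.2 t)) st := by
  induction l generalizing st with
  | nil => rfl
  | cons x xs ih =>
    rw [List.foldl_cons, List.filterMap_cons]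
    cases h : pvCoerceItem x with
    | none => rw [ih]; simp [pvStepA, h]
    | some t => rw [ih]; simp [pvStepA, h]

-- The seen-set fold over keys equals the sieve applied to the keys not yet seen.
lemma pv_fold_sieve (ks : List (String × String × String))
    (out : List (List (String × String))) (seen : PySem.Set (String × String × String)) :
    (ks.foldl
        (fun st t =>
          if PySem.Set.contains st.2 t then st
          else (st.1 ++ [pvMkOut t], PySem.Set.add st.2 t)) (out, seen)).1
      = out ++ pvSieve (ks.filter (fun t => !PySem.Set.contains seen t)) := by
  induction ks generalizing out seen with
  | nil => simp [pvSieve_nil]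
  | cons k ks ih =>
    rw [List.foldl_cons]
    by_cases hk : k ∈ seen
    · rw [if_pos (by simp [PySem.Set.contains, hk]),
        List.filter_cons_of_neg (by simp [PySem.Set.contains, hk]), ih]
    · rw [if_neg (by simp [PySem.Set.contains, hk]),
        List.filter_cons_of_pos (by simp [PySem.Set.contains, hk]), ih,
        List.append_assoc]
      congr 1
      rw [pvSieve_cons]
      have hf : ks.filter (fun t => !PySem.Set.contains (PySem.Set.add seen k) t)
          = (ks.filter (fun t => !PySem.Set.contains seen t)).filter
              (fun t => decide (t ≠ k)) := by
        rw [List.filter_filter]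
        apply List.filter_congr
        intro t _
        by_cases h1 : t = k <;> by_cases h2 : t ∈ seen <;>
          simp [PySem.Set.add, PySem.Set.contains, hk, h1, h2]
      rw [hf]
      simp

-- ===== VERDICT (by name: the statement is the Claim_ definition above) =====
theorem dedupe_dispatch_mappings_spec : Claim_equal_dedupe_dispatch_mappings := by
  intro dispatches _
  unfold Spec_dedupe_dispatch_mappings
  unfold dedupe_dispatch_mappings dedupe_dispatch_mappings_alt
  rw [pv_foldA_filterMap]
  have h := pv_fold_sieve (dispatches.filterMap pvCoerceItem) [] PySem.Set.empty
  simpa [PySem.Set.empty, PySem.Set.contains] using h
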